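-- pv_equiv track=rewrite | github.com/oliverodhe/n-queens | src/utils/validate.py | is_valid_positions
-- ===== SOURCE A (Python) =====
-- from typing import List, Tuple, Optional
--
-- def is_valid_positions(pos: List[Tuple[int,int]]) -> bool:
--     rows = [r for r, _ in pos]
--     cols = [c for _, c in pos]
--     if len(set(rows)) != len(rows): return False
--     if len(set(cols)) != len(cols): return False
--
--     diag1 = [r - c for r, c in pos]
--     diag2 = [r + c for r, c in pos]
--     if len(set(diag1)) != len(diag1): return False
--     if len(set(diag2)) != len(diag2): return False
--     return True
-- ===== SOURCE B (Python) =====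
-- from typing import List, Tuple
--
-- def _no_dup_sorted(xs):
--     # sort, then a conflict exists iff two equal values end up adjacent
--     ys = sorted(xs)
--     for i in range(1, len(ys)):
--         if ys[i - 1] == ys[i]:
--             return False
--     return True
--
-- def is_valid_positions(pos: List[Tuple[int, int]]) -> bool:
--     return (_no_dup_sorted([r for r, _ in pos])
--         and _no_dup_sorted([c for _, c in pos])
--         and _no_dup_sorted([r - c for r, c in pos])
--         and _no_dup_sorted([r + c for r, c in pos]))
-- ===== Notes on version B (the rewrite author's own statement) =====
-- stated objective: alternative
-- what changed: Duplicate detection is done by sorting each projection (rows, cols, r-c, r+c) and scanning adjacent pairs for an equal neighbour, instead of A's hash-set cardinality comparisons; no sets are used at all.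
import Mathlib
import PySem

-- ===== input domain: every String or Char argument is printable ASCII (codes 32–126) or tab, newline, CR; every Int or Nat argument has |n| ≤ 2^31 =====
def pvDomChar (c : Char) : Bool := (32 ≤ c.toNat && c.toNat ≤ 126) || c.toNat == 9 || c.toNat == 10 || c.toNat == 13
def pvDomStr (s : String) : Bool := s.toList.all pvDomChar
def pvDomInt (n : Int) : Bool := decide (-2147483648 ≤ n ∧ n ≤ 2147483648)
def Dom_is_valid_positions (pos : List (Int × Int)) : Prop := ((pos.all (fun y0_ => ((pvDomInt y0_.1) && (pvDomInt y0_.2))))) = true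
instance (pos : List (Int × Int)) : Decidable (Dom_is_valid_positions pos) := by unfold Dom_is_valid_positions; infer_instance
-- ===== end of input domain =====

-- B detects duplicates in each projection (rows, cols, r-c, r+c) by sorting it and scanning
-- adjacent pairs, instead of A's set-cardinality comparisons; alternative algorithm, not claimed faster.

-- ===== PORT A =====
def is_valid_positions (pos : List (Int × Int)) : Bool :=
  let rows := pos.map (fun p => p.1)
  let cols := pos.map (fun p => p.2)
  if (PySem.Set.ofList rows).length ≠ rows.length then false
  else if (PySem.Set.ofList cols).length ≠ cols.length then false
  else
    let diag1 := pos.map (fun p => p.1 - p.2)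
    let diag2 := pos.map (fun p => p.1 + p.2)
    if (PySem.Set.ofList diag1).length ≠ diag1.length then false
    else if (PySem.Set.ofList diag2).length ≠ diag2.length then false
    else true

-- ===== PORT B =====
-- the for-loop over range(1, len(ys)) comparing ys[i-1] with ys[i], with early return False
def adjScan : List Int → Bool
  | a :: b :: t => if a == b then false else adjScan (b :: t)
  | _ => true

def noDupSorted (xs : List Int) : Bool :=
  adjScan (PySem.List.sorted xs (fun x => x) false)

def is_valid_positions_alt (pos : List (Int × Int)) : Bool :=
  noDupSorted (pos.map (fun p => p.1)) &&
  noDupSorted (pos.map (fun p => p.2)) &&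
  noDupSorted (pos.map (fun p => p.1 - p.2)) &&
  noDupSorted (pos.map (fun p => p.1 + p.2))

-- ===== PRECONDITION & SPEC =====
def Spec_is_valid_positions (pos : List (Int × Int)) (out : Bool) : Prop := out = is_valid_positions_alt pos
instance (pos : List (Int × Int)) (out : Bool) : Decidable (Spec_is_valid_positions pos out) := by unfold Spec_is_valid_positions; infer_instance

-- ===== CLAIM (what is proved, stated in full; the proofs are below) =====
def Claim_equal_is_valid_positions : Prop := ∀ (pos : List (Int × Int)), Dom_is_valid_positions pos → Spec_is_valid_positions pos (is_valid_positions pos)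

-- ===== LEMMAS AND PROOFS =====

-- len(set(xs)) == len(xs) iff xs has no duplicates
theorem length_ofList_eq_iff {α : Type} [BEq α] [LawfulBEq α] (xs : List α) :
    (PySem.Set.ofList xs).length = xs.length ↔ xs.Nodup := by
  induction xs using List.reverseRecOn with
  | nil => simp [PySem.Set.ofList]
  | append_singleton ys x ih =>
    rw [PySem.Set.ofList_append_singleton, PySem.Set.add_eq_ite]
    have hle : (PySem.Set.ofList ys).length ≤ ys.length := PySem.Set.length_ofList_le ys
    by_cases hx : x ∈ PySem.Set.ofList ys
    · rw [if_pos hx]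
      have hxy : x ∈ ys := (PySem.Set.mem_ofList ys x).1 hx
      constructor
      · intro h; rw [List.length_append, List.length_singleton] at h; omega
      · intro h
        exact absurd (List.disjoint_of_nodup_append h hxy (List.mem_singleton.2 rfl)) (by simp)
    · rw [if_neg hx]
      have hxy : x ∉ ys := fun h => hx ((PySem.Set.mem_ofList ys x).2 h)
      simp only [List.length_append, List.length_singleton, List.nodup_append, ← ih]
      constructor
      · intro h
        refine ⟨by omega, by simp, ?_⟩
        intro a ha
        exact fun b hb heq => hxy ((heq.trans (List.mem_singleton.1 hb)) ▸ ha)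
      · rintro ⟨h, -⟩
        omega

-- the adjacent scan on a ≤-ordered list detects exactly duplicate-freeness
theorem adjScan_true_iff_nodup : ∀ ys : List Int, ys.Pairwise (· ≤ ·) →
    (adjScan ys = true ↔ ys.Nodup) := by
  intro ys
  induction ys with
  | nil => simp [adjScan]
  | cons a t ih =>
    intro hp
    cases t with
    | nil => simp [adjScan]
    | cons b t' =>
      have hab : a ≤ b := (List.pairwise_cons.1 hp).1 b (by simp)
      have hat : ∀ x ∈ t', a ≤ x := fun x hx => (List.pairwise_cons.1 hp).1 x (by simp [hx])
      have hp' : (b :: t').Pairwise (· ≤ ·) := (List.pairwise_cons.1 hp).2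
      have hbt : ∀ x ∈ t', b ≤ x := fun x hx => (List.pairwise_cons.1 hp').1 x hx
      show (if a == b then false else adjScan (b :: t')) = true ↔ (a :: b :: t').Nodup
      by_cases hab2 : a = b
      · subst hab2; simp
      · rw [if_neg (by simpa using hab2), ih hp']
        have hlt : a < b := lt_of_le_of_ne hab hab2
        constructor
        · intro h
          rw [List.nodup_cons]
          refine ⟨?_, h⟩
          intro hm
          rcases List.mem_cons.1 hm with rfl | hm'
          · exact hab2 rfl
          · exact absurd (lt_of_lt_of_le hlt (hbt a hm')) (lt_irrefl a)
        · intro h; exact (List.nodup_cons.1 h).2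

theorem noDupSorted_iff (xs : List Int) : noDupSorted xs = true ↔ xs.Nodup := by
  unfold noDupSorted
  rw [adjScan_true_iff_nodup _ (PySem.List.sorted_pairwise xs (fun x => x))]
  exact (PySem.List.sorted_perm xs (fun x => x) false).nodup_iff

theorem alt_true_iff (pos : List (Int × Int)) :
    is_valid_positions_alt pos = true ↔
      (pos.map (fun p => p.1)).Nodup ∧ (pos.map (fun p => p.2)).Nodup ∧
      (pos.map (fun p => p.1 - p.2)).Nodup ∧ (pos.map (fun p => p.1 + p.2)).Nodup := by
  unfold is_valid_positions_alt
  simp [noDupSorted_iff, and_assoc]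

theorem a_true_iff (pos : List (Int × Int)) :
    is_valid_positions pos = true ↔
      (pos.map (fun p => p.1)).Nodup ∧ (pos.map (fun p => p.2)).Nodup ∧
      (pos.map (fun p => p.1 - p.2)).Nodup ∧ (pos.map (fun p => p.1 + p.2)).Nodup := by
  unfold is_valid_positions
  dsimp only
  have e1 := length_ofList_eq_iff (pos.map (fun p => p.1))
  have e2 := length_ofList_eq_iff (pos.map (fun p => p.2))
  have e3 := length_ofList_eq_iff (pos.map (fun p => p.1 - p.2))
  have e4 := length_ofList_eq_iff (pos.map (fun p => p.1 + p.2))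
  split_ifs with h1 h2 h3 h4
  · exact iff_of_false (by simp) (fun hh => h1 (e1.2 hh.1))
  · exact iff_of_false (by simp) (fun hh => h2 (e2.2 hh.2.1))
  · exact iff_of_false (by simp) (fun hh => h3 (e3.2 hh.2.2.1))
  · exact iff_of_false (by simp) (fun hh => h4 (e4.2 hh.2.2.2))
  · exact iff_of_true rfl ⟨e1.1 (not_not.1 h1), e2.1 (not_not.1 h2),
      e3.1 (not_not.1 h3), e4.1 (not_not.1 h4)⟩

-- ===== VERDICT (by name: the statement is the Claim_ definition above) =====
theorem is_valid_positions_spec : Claim_equal_is_valid_positions := by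
  intro pos _
  unfold Spec_is_valid_positions
  rw [Bool.eq_iff_iff, a_true_iff, alt_true_iff]
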